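-- pv_equiv track=rewrite | github.com/soo5717/2021-Algorithm-Study | Programmers/suyeon/28_week/파일명 정렬.py | file_split
-- ===== SOURCE A (Python) =====
-- def file_split(file):
--     head, number = '', 0
--
--     for idx, token in enumerate(file):
--         if token.isdigit():
--             head = file[:idx]
--             file = file[idx:]
--             break
--
--     number_flag = False
--     for idx, token in enumerate(file):
--         if not token.isdigit():
--             number = file[:idx]
--             number_flag = True
--             break
--
--     if not number_flag:
--         number = file
--
--     return (head.lower(), int(number))
-- ===== SOURCE B (Python) =====
-- def file_split(file):
--     # single pass: count the head length and the digit-run length, then slice once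
--     head_len = 0
--     num_len = 0
--     seen = False
--     for c in file:
--         if c.isdigit():
--             seen = True
--             num_len += 1
--         elif seen:
--             break
--         else:
--             head_len += 1
--     if not seen:
--         raise ValueError("no number in filename")
--     return (file[:head_len].lower(), int(file[head_len:head_len + num_len]))
-- ===== Notes on version B (the rewrite author's own statement) =====
-- stated objective: alternative
-- what changed: Replaces A's two enumerate loops with break/flag and re-slicing of the mutated variable by a single state-machine pass that counts head length and digit-run length, slicing once at the end.
-- outside the precondition, e.g. on file_split(''): A raises ValueError, B raises ValueError; on file_split('foo'): A raises ValueError, B raises ValueError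
import Mathlib
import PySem

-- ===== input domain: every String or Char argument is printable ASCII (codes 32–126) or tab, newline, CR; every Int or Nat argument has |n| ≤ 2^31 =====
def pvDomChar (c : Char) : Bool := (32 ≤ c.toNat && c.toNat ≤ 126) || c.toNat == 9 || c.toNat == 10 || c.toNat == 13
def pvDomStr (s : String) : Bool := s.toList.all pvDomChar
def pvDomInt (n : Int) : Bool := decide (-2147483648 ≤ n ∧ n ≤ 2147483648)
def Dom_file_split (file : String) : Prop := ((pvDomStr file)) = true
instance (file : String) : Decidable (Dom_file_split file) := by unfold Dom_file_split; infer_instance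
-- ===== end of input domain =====

-- B replaces A's two scanning loops (break/flag, re-slicing the mutated variable) by one
-- state-machine pass counting head and digit-run lengths; equal return values on Pre_ (alternative, not faster).


-- ===== PORT A =====
-- first loop: 'for idx, token in enumerate(file): if token.isdigit(): … break' — first digit index
def pvFindDigit : List Char → Nat → Option Nat
  | [], _ => none
  | c :: cs, k => if PySem.Chars.isdigit c then some k else pvFindDigit cs (k + 1)

-- second loop: first non-digit index (number_flag set exactly when it breaks)
def pvFindNonDigit : List Char → Nat → Option Nat
  | [], _ => none
  | c :: cs, k => if PySem.Chars.isdigit c then pvFindNonDigit cs (k + 1) else some k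

def file_split (file : String) : String × Int :=
  let cs := file.toList
  -- head = file[:idx], file = file[idx:]: idx is a nonnegative in-range enumerate index,
  -- so these slices are exactly take/drop
  let hr : List Char × List Char :=
    match pvFindDigit cs 0 with
    | some i => (cs.take i, cs.drop i)
    | none => (([] : List Char), cs)
  -- number = file[:idx] at the first non-digit; if the flag stays False, number = file
  let number : List Char :=
    match pvFindNonDigit hr.2 0 with
    | some j => hr.2.take j
    | none => hr.2
  -- int(number): ofChars? is none exactly where Python's int raises ValueError; Pre_ excludes those inputs
  (String.ofList (PySem.Chars.lower hr.1), (PySem.Int.ofChars? number).getD 0)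

-- ===== PORT B =====
-- Source B's single for-loop over the characters with state (head_len, num_len, seen)
def pvScan : List Char → Nat → Nat → Bool → Nat × Nat × Bool
  | [], h, n, s => (h, n, s)
  | c :: cs, h, n, s =>
    if PySem.Chars.isdigit c then pvScan cs h (n + 1) true
    else if s then (h, n, s)
    else pvScan cs (h + 1) n s

def file_split_alt (file : String) : String × Int :=
  let cs := file.toList
  match pvScan cs 0 0 false with
  | (h, n, true) =>
    -- file[:head_len] and file[head_len:head_len+num_len] with nonnegative in-range bounds = take/drop
    (String.ofList (PySem.Chars.lower (cs.take h)), (PySem.Int.ofChars? ((cs.drop h).take n)).getD 0)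
  | (_, _, false) => ("", 0)   -- Source B raises ValueError here; Pre_ excludes these inputs

-- ===== PRECONDITION & SPEC =====
-- Pre_ excludes exactly the strings with no digit, on which A raises ValueError (int('')): no returning input is excluded.
def Pre_file_split (file : String) : Prop := file.toList.any PySem.Chars.isdigit = true
instance (file : String) : Decidable (Pre_file_split file) := by unfold Pre_file_split; infer_instance
def pvWitness_file_split : String := "img12.png"

def Spec_file_split (file : String) (out : String × Int) : Prop := out = file_split_alt file
instance (file : String) (out : String × Int) : Decidable (Spec_file_split file out) := by unfold Spec_file_split; infer_instance

-- ===== CLAIM (what is proved, stated in full; the proofs are below) =====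
def Claim_equal_file_split : Prop := ∀ (file : String), Dom_file_split file → Pre_file_split file → Spec_file_split file (file_split file)

-- ===== LEMMAS AND PROOFS =====

theorem pvFindDigit_eq (cs : List Char) (k : Nat) :
    pvFindDigit cs k =
      if cs.any PySem.Chars.isdigit then
        some (k + (cs.takeWhile (fun c => !PySem.Chars.isdigit c)).length) else none := by
  induction cs generalizing k with
  | nil => simp [pvFindDigit]
  | cons c cs ih =>
    by_cases h : PySem.Chars.isdigit c
    · simp [pvFindDigit, h]
    · rw [show pvFindDigit (c :: cs) k = pvFindDigit cs (k + 1) by simp [pvFindDigit, h], ih]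
      by_cases h2 : cs.any PySem.Chars.isdigit
      · simp [h, h2]; omega
      · simp [h, h2]

theorem pvFindNonDigit_eq (cs : List Char) (k : Nat) :
    pvFindNonDigit cs k =
      if cs.all PySem.Chars.isdigit then none
      else some (k + (cs.takeWhile PySem.Chars.isdigit).length) := by
  induction cs generalizing k with
  | nil => simp [pvFindNonDigit]
  | cons c cs ih =>
    by_cases h : PySem.Chars.isdigit c
    · rw [show pvFindNonDigit (c :: cs) k = pvFindNonDigit cs (k + 1) by simp [pvFindNonDigit, h], ih]
      by_cases h2 : cs.all PySem.Chars.isdigit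
      · simp [h, h2]
      · simp [h, h2]; omega
    · simp [pvFindNonDigit, h]

theorem pvScan_seen (cs : List Char) (h n : Nat) :
    pvScan cs h n true = (h, n + (cs.takeWhile PySem.Chars.isdigit).length, true) := by
  induction cs generalizing n with
  | nil => simp [pvScan]
  | cons c cs ih =>
    by_cases hd : PySem.Chars.isdigit c
    · simp [pvScan, hd, ih]; omega
    · simp [pvScan, hd]

theorem pvScan_unseen (cs : List Char) (h : Nat) :
    pvScan cs h 0 false =
      if cs.any PySem.Chars.isdigit then
        ((h + (cs.takeWhile (fun c => !PySem.Chars.isdigit c)).length),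
         ((cs.dropWhile (fun c => !PySem.Chars.isdigit c)).takeWhile PySem.Chars.isdigit).length,
         true)
      else (h + cs.length, 0, false) := by
  induction cs generalizing h with
  | nil => simp [pvScan]
  | cons c cs ih =>
    by_cases hd : PySem.Chars.isdigit c
    · simp [pvScan, hd, pvScan_seen]; omega
    · rw [show pvScan (c :: cs) h 0 false = pvScan cs (h + 1) 0 false by simp [pvScan, hd], ih]
      by_cases h2 : cs.any PySem.Chars.isdigit
      · simp [hd, h2]; omega
      · simp [hd, h2]; omega

theorem take_len_takeWhile {α : Type} (p : α → Bool) (cs : List α) :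
    cs.take (cs.takeWhile p).length = cs.takeWhile p := by
  induction cs with
  | nil => simp
  | cons c cs ih =>
    by_cases h : p c
    · simp [h, ih]
    · simp [h]

theorem drop_len_takeWhile {α : Type} (p : α → Bool) (cs : List α) :
    cs.drop (cs.takeWhile p).length = cs.dropWhile p := by
  induction cs with
  | nil => simp
  | cons c cs ih =>
    by_cases h : p c
    · simp [List.dropWhile_cons, h, ih]
    · simp [List.dropWhile_cons, h]

-- ===== VERDICT (by name: the statement is the Claim_ definition above) =====
theorem file_split_spec : Claim_equal_file_split := by
  intro file _ hpre
  unfold Pre_file_split at hpre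
  unfold Spec_file_split file_split file_split_alt
  simp only [pvFindDigit_eq, pvScan_unseen, hpre, if_true, Nat.zero_add]
  rw [take_len_takeWhile, drop_len_takeWhile, pvFindNonDigit_eq]
  by_cases hall : (file.toList.dropWhile (fun c => !PySem.Chars.isdigit c)).all PySem.Chars.isdigit
  · have heq : (file.toList.dropWhile (fun c => !PySem.Chars.isdigit c)).takeWhile PySem.Chars.isdigit
        = file.toList.dropWhile (fun c => !PySem.Chars.isdigit c) :=
      List.takeWhile_eq_self_iff.mpr (fun c hc => List.all_eq_true.mp hall c hc)
    simp only [hall, if_true, heq, List.take_length]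
  · simp only [hall, if_false, Bool.false_eq_true, Nat.zero_add, take_len_takeWhile]
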